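-- pv_equiv track=rewrite | github.com/miroslavio/Python_Euler | problem_57.py | num_more
-- ===== SOURCE A (Python) =====
-- def num_more(frac):
--     count_num = 0
--     count_den = 0
--     num = frac[0]
--     den = frac[1]
--     while num:
--         count_num += 1
--         num //= 10
--     while den:
--         count_den += 1
--         den //= 10
--     return count_num > count_den
-- ===== SOURCE B (Python) =====
-- def num_more(frac):
--     num, den = frac
--     while num and den:
--         num //= 10
--         den //= 10
--     return num != 0
-- ===== Notes on version B (the rewrite author's own statement) =====
-- stated objective: simpler
-- what changed: Replaces the two independent digit-counting loops with a single interleaved loop that strips one digit from both numbers at a time and tests whether the numerator has a digit left.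
-- outside the precondition, e.g. on num_more((-3, 2)): A does not finish within the time limit, B returns True
import Mathlib
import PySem

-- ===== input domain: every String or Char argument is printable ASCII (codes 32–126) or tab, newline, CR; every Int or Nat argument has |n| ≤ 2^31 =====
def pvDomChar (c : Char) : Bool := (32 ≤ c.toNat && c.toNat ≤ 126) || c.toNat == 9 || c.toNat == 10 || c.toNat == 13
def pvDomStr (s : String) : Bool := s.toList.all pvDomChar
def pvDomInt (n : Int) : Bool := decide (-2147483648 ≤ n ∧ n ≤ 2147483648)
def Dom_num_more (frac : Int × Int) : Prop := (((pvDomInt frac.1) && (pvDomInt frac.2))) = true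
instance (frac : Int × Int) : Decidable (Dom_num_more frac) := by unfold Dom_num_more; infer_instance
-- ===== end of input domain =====

-- B replaces A's two independent digit-counting loops by one interleaved loop stripping a digit
-- from both numbers at once; equal on all non-negative inputs (A loops forever on negatives).

-- ===== PORT A =====
-- A's 'while n: count += 1; n //= 10'; guarded by 0 < n so Lean recursion terminates — faithful
-- on the nonnegative domain Pre_ admits (Python A never terminates for negative n).
def pvDigits (n : Int) : Int :=
  if h : 0 < n then 1 + pvDigits (PySem.Int.floordiv n 10) else 0
termination_by n.toNat
decreasing_by
  have := PySem.Int.floordiv_eq_ediv_of_pos (a := n) (b := 10) (by omega)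
  rw [this]; omega

def num_more (frac : Int × Int) : Bool :=
  let count_num := pvDigits frac.1
  let count_den := pvDigits frac.2
  decide (count_num > count_den)

-- ===== PORT B =====
-- B's 'while num and den: num //= 10; den //= 10'; guard written as 0 < for termination —
-- faithful on the nonnegative domain Pre_ admits.
def pvStrip (num den : Int) : Int × Int :=
  if _h : 0 < num ∧ 0 < den then
    pvStrip (PySem.Int.floordiv num 10) (PySem.Int.floordiv den 10)
  else (num, den)
termination_by num.toNat
decreasing_by
  have := PySem.Int.floordiv_eq_ediv_of_pos (a := num) (b := 10) (by omega)
  rw [this]; omega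

def num_more_alt (frac : Int × Int) : Bool :=
  decide ((pvStrip frac.1 frac.2).1 ≠ 0)

-- ===== PRECONDITION & SPEC =====
-- Pre_ excludes inputs with a negative component: there Python A's digit loop never
-- terminates (n //= 10 is stuck at -1), so A returns on exactly the nonnegative pairs.
def Pre_num_more (frac : Int × Int) : Prop := 0 ≤ frac.1 ∧ 0 ≤ frac.2
instance (frac : Int × Int) : Decidable (Pre_num_more frac) := by unfold Pre_num_more; infer_instance
def pvWitness_num_more : (Int × Int) := (314, 27)

def Spec_num_more (frac : Int × Int) (out : Bool) : Prop := out = num_more_alt frac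
instance (frac : Int × Int) (out : Bool) : Decidable (Spec_num_more frac out) := by unfold Spec_num_more; infer_instance

-- ===== CLAIM (what is proved, stated in full; the proofs are below) =====
def Claim_equal_num_more : Prop := ∀ (frac : Int × Int), Dom_num_more frac → Pre_num_more frac → Spec_num_more frac (num_more frac)

-- ===== LEMMAS AND PROOFS =====

theorem pvDigits_nonneg (n : Int) : 0 ≤ pvDigits n := by
  unfold pvDigits
  split
  · have := pvDigits_nonneg (PySem.Int.floordiv n 10); omega
  · omega
termination_by n.toNat
decreasing_by
  have := PySem.Int.floordiv_eq_ediv_of_pos (a := n) (b := 10) (by omega)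
  rw [this]; omega

theorem pvDigits_step (n : Int) (h : 0 < n) :
    pvDigits n = 1 + pvDigits (PySem.Int.floordiv n 10) := by
  rw [pvDigits, dif_pos h]

theorem pvDigits_zero : pvDigits 0 = 0 := by
  rw [pvDigits]; norm_num

theorem pvDigits_pos_iff (n : Int) (hn : 0 ≤ n) : 0 < pvDigits n ↔ 0 < n := by
  constructor
  · intro h
    by_contra hneg
    have hz : n = 0 := by omega
    rw [hz, pvDigits_zero] at h
    omega
  · intro h
    rw [pvDigits_step n h]
    have := pvDigits_nonneg (PySem.Int.floordiv n 10)
    omega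

-- core invariant: the interleaved strip leaves a nonzero numerator iff num has more digits
theorem pvStrip_iff (num den : Int) (hn : 0 ≤ num) (hd : 0 ≤ den) :
    (pvStrip num den).1 ≠ 0 ↔ pvDigits den < pvDigits num := by
  rw [pvStrip]
  by_cases h : 0 < num ∧ 0 < den
  · rw [dif_pos h]
    have hfd : PySem.Int.floordiv num 10 = num / 10 :=
      PySem.Int.floordiv_eq_ediv_of_pos (by omega)
    have hfd' : PySem.Int.floordiv den 10 = den / 10 :=
      PySem.Int.floordiv_eq_ediv_of_pos (by omega)
    have ih := pvStrip_iff (PySem.Int.floordiv num 10) (PySem.Int.floordiv den 10)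
      (by rw [hfd]; positivity) (by rw [hfd']; positivity)
    rw [ih, pvDigits_step num h.1, pvDigits_step den h.2]
    omega
  · rw [dif_neg h]
    have hcase : num = 0 ∨ den = 0 := by omega
    rcases hcase with h0 | h0
    · subst h0
      simp only [pvDigits_zero]
      have := pvDigits_nonneg den
      simp
      omega
    · subst h0
      simp only [pvDigits_zero]
      have h1 := pvDigits_pos_iff num hn
      have h2 := pvDigits_nonneg num
      simp
      omega
termination_by num.toNat
decreasing_by
  have := PySem.Int.floordiv_eq_ediv_of_pos (a := num) (b := 10) (by omega)
  rw [this]; omega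

-- ===== VERDICT (by name: the statement is the Claim_ definition above) =====
theorem num_more_spec : Claim_equal_num_more := by
  intro frac _ hpre
  unfold Spec_num_more num_more num_more_alt
  have h := pvStrip_iff frac.1 frac.2 hpre.1 hpre.2
  simp only [decide_eq_decide]
  rw [h]
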